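-- pv_equiv track=rewrite | github.com/hailingfang/biobrary | biobrary/misc.py | change_coordinate_abs
-- ===== SOURCE A (Python) =====
-- import copy
--
-- def change_coordinate_abs(ref, pos, ori="+"):
--     ref = copy.deepcopy(ref)
--     ref.sort(key=lambda x:x[0])
--     if ori == "+":
--         for ele in ref:
--             block_len = ele[1] - ele[0] + 1
--             if pos <= block_len:
--                 return ele[0] + pos - 1
--             pos -= block_len
--
--     else:
--         for ele in ref[::-1]:
--             block_len = ele[1] - ele[0] + 1
--             if pos <= block_len:
--                 return ele[1] - pos + 1
--             pos -= block_len
-- ===== SOURCE B (Python) =====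
-- def change_coordinate_abs(ref, pos, ori="+"):
--     blocks = sorted(ref, key=lambda x: x[0])
--     if ori != "+":
--         blocks = blocks[::-1]
--     # prefix sums of block lengths
--     cums = []
--     t = 0
--     for lo, hi in blocks:
--         t += hi - lo + 1
--         cums.append(t)
--     # first index whose cumulative length reaches pos
--     j = 0
--     for c in cums:
--         if c >= pos:
--             break
--         j += 1
--     if j == len(cums):
--         return None
--     prev = cums[j - 1] if j > 0 else 0
--     off = pos - prev
--     lo, hi = blocks[j]
--     if ori == "+":
--         return lo + off - 1
--     return hi - off + 1
-- ===== Notes on version B (the rewrite author's own statement) =====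
-- stated objective: alternative
-- what changed: Instead of A's single loop that destructively decrements pos block by block with an early return, B builds a prefix-sum list of block lengths once, locates the first cumulative sum reaching pos by an index search, and computes the answer arithmetically from the stored prefix sums and the indexed block.
import Mathlib
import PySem

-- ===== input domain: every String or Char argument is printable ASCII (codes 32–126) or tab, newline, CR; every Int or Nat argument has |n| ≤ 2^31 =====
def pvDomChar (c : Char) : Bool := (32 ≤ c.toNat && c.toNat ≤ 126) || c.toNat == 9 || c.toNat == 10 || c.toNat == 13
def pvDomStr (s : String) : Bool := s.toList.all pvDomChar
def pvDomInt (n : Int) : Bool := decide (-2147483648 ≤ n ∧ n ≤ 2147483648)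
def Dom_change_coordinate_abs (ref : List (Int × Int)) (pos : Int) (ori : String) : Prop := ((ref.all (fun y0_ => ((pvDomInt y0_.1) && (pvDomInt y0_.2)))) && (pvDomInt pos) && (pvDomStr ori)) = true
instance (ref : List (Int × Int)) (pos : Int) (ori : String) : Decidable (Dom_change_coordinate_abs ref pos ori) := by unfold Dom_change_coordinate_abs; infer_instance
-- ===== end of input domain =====

-- B replaces A's destructive pos-decrementing loop by a prefix-sum list plus an index search
-- (alternative decomposition, same cost); return values agree everywhere, proved below.

-- ===== PORT A =====
-- the '+' loop of A: decrement pos by each block length, early return inside the loop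
def aGoPlus : List (Int × Int) → Int → Option Int
  | [], _ => none
  | (lo, hi) :: rest, pos =>
      let blockLen := hi - lo + 1
      if pos ≤ blockLen then some (lo + pos - 1)
      else aGoPlus rest (pos - blockLen)

-- the else-branch loop of A over ref[::-1]
def aGoMinus : List (Int × Int) → Int → Option Int
  | [], _ => none
  | (lo, hi) :: rest, pos =>
      let blockLen := hi - lo + 1
      if pos ≤ blockLen then some (hi - pos + 1)
      else aGoMinus rest (pos - blockLen)

def change_coordinate_abs (ref : List (Int × Int)) (pos : Int) (ori : String) : Option Int :=
  let ref := PySem.List.sorted ref (key := fun x => x.1)   -- ref.sort(key=lambda x: x[0])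
  if ori == "+" then aGoPlus ref pos
  else aGoMinus ref.reverse pos                            -- ref[::-1] is exactly List.reverse

-- ===== PORT B =====
-- prefix sums of block lengths (the cums-building loop, accumulator t)
def bCums : Int → List (Int × Int) → List Int
  | _, [] => []
  | t, (lo, hi) :: rest =>
      let t' := t + (hi - lo + 1)
      t' :: bCums t' rest

-- the j-search loop: count leading cums strictly below pos (break at the first c ≥ pos)
def bFindJ : List Int → Int → Nat
  | [], _ => 0
  | c :: rest, pos => if c ≥ pos then 0 else bFindJ rest pos + 1

def change_coordinate_abs_alt (ref : List (Int × Int)) (pos : Int) (ori : String) : Option Int :=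
  let blocks0 := PySem.List.sorted ref (key := fun x => x.1)
  let blocks := if ori ≠ "+" then blocks0.reverse else blocks0
  let cums := bCums 0 blocks
  let j := bFindJ cums pos
  if j = cums.length then none
  else
    let prev := if 0 < j then cums.getD (j - 1) 0 else 0
    let off := pos - prev
    let b := blocks.getD j (0, 0)
    if ori == "+" then some (b.1 + off - 1) else some (b.2 - off + 1)

-- ===== PRECONDITION & SPEC =====
def Spec_change_coordinate_abs (ref : List (Int × Int)) (pos : Int) (ori : String) (out : Option Int) : Prop := out = change_coordinate_abs_alt ref pos ori
instance (ref : List (Int × Int)) (pos : Int) (ori : String) (out : Option Int) : Decidable (Spec_change_coordinate_abs ref pos ori out) := by unfold Spec_change_coordinate_abs; infer_instance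

-- ===== CLAIM (what is proved, stated in full; the proofs are below) =====
def Claim_equal_change_coordinate_abs : Prop := ∀ (ref : List (Int × Int)) (pos : Int) (ori : String), Dom_change_coordinate_abs ref pos ori → Spec_change_coordinate_abs ref pos ori (change_coordinate_abs ref pos ori)

-- ===== LEMMAS AND PROOFS =====

-- B's value on a block list, parametric in the final expression f (lo,hi) offset
def bEvalF (f : Int × Int → Int → Int) (blocks : List (Int × Int)) (pos : Int) : Option Int :=
  let cums := bCums 0 blocks
  let j := bFindJ cums pos
  if j = cums.length then none
  else
    let prev := if 0 < j then cums.getD (j - 1) 0 else 0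
    some (f (blocks.getD j (0, 0)) (pos - prev))

-- A's loop, parametric in the final expression
def aGoF (f : Int × Int → Int → Int) : List (Int × Int) → Int → Option Int
  | [], _ => none
  | (lo, hi) :: rest, pos =>
      let blockLen := hi - lo + 1
      if pos ≤ blockLen then some (f (lo, hi) pos)
      else aGoF f rest (pos - blockLen)

theorem aGoPlus_eq_F (bs : List (Int × Int)) (pos : Int) :
    aGoPlus bs pos = aGoF (fun b off => b.1 + off - 1) bs pos := by
  induction bs generalizing pos with
  | nil => rfl
  | cons b rest ih =>
      obtain ⟨lo, hi⟩ := b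
      simp only [aGoPlus, aGoF]
      split_ifs <;> simp [ih]

theorem aGoMinus_eq_F (bs : List (Int × Int)) (pos : Int) :
    aGoMinus bs pos = aGoF (fun b off => b.2 - off + 1) bs pos := by
  induction bs generalizing pos with
  | nil => rfl
  | cons b rest ih =>
      obtain ⟨lo, hi⟩ := b
      simp only [aGoMinus, aGoF]
      split_ifs <;> simp [ih]

theorem bCums_shift (t : Int) (bs : List (Int × Int)) :
    bCums t bs = (bCums 0 bs).map (t + ·) := by
  induction bs generalizing t with
  | nil => rfl
  | cons b rest ih =>
      obtain ⟨lo, hi⟩ := b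
      simp only [bCums, List.map_cons, List.cons.injEq]
      refine ⟨by ring, ?_⟩
      rw [ih (t + (hi - lo + 1)), ih (0 + (hi - lo + 1)), List.map_map]
      congr 1
      funext x
      simp only [Function.comp]
      ring

theorem bFindJ_shift (t : Int) (cs : List Int) (pos : Int) :
    bFindJ (cs.map (t + ·)) pos = bFindJ cs (pos - t) := by
  induction cs with
  | nil => rfl
  | cons c rest ih =>
      simp only [List.map_cons, bFindJ]
      have h : (t + c ≥ pos) ↔ (c ≥ pos - t) := by omega
      simp only [h, ih]

theorem bFindJ_le (cs : List Int) (pos : Int) : bFindJ cs pos ≤ cs.length := by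
  induction cs with
  | nil => simp [bFindJ]
  | cons c rest ih =>
      simp only [bFindJ, List.length_cons]
      split_ifs <;> omega

theorem getD_map_add (t : Int) (cs : List Int) (i : Nat) (h : i < cs.length) :
    (cs.map (t + ·)).getD i 0 = t + cs.getD i 0 := by
  simp [List.getD, List.getElem?_map, List.getElem?_eq_getElem h]

theorem aGoF_eq_bEvalF (f : Int × Int → Int → Int) (bs : List (Int × Int)) (pos : Int) :
    aGoF f bs pos = bEvalF f bs pos := by
  induction bs generalizing pos with
  | nil => rfl
  | cons b rest ih =>
      obtain ⟨lo, hi⟩ := b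
      by_cases hle : pos ≤ hi - lo + 1
      · -- first block already reaches pos: j = 0
        simp [aGoF, bEvalF, bCums, bFindJ, hle]
      · -- the block does not reach pos: both sides recurse / shift by the block length
        have step : bEvalF f ((lo, hi) :: rest) pos = bEvalF f rest (pos - (hi - lo + 1)) := by
          simp only [bEvalF, bCums]
          rw [bCums_shift (0 + (hi - lo + 1)) rest]
          have hlt : ¬ (0 + (hi - lo + 1) ≥ pos) := by omega
          simp only [bFindJ, hlt, if_false, bFindJ_shift]
          have harg : pos - (0 + (hi - lo + 1)) = pos - (hi - lo + 1) := by ring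
          rw [harg]
          set cs := bCums 0 rest with hcs
          set j := bFindJ cs (pos - (hi - lo + 1)) with hj
          by_cases hend : j = cs.length
          · simp [hend]
          · have hjlt : j < cs.length := lt_of_le_of_ne (bFindJ_le cs _) hend
            have h1 : ¬ (j + 1 = (List.map ((0 + (hi - lo + 1)) + ·) cs).length + 1) := by
              simp only [List.length_map]; omega
            simp only [List.length_cons, h1, if_false, hend, if_false]
            congr 1
            by_cases hj0 : 0 < j
            · have hjm : j - 1 < cs.length := by omega
              have hsucc : j + 1 - 1 = (j - 1) + 1 := by omega
              simp only [hj0, if_pos, Nat.zero_lt_succ, hsucc,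
                List.getD_cons_succ, getD_map_add _ _ _ hjm]
              congr 1
              ring
            · have hj0' : j = 0 := by omega
              simp [hj0']
        rw [step]
        simp only [aGoF, hle, if_false]
        exact ih (pos - (hi - lo + 1))

-- ===== VERDICT (by name: the statement is the Claim_ definition above) =====
theorem change_coordinate_abs_spec : Claim_equal_change_coordinate_abs := by
  intro ref pos ori _
  unfold Spec_change_coordinate_abs change_coordinate_abs change_coordinate_abs_alt
  by_cases h : ori = "+"
  · simp [h, aGoPlus_eq_F, aGoF_eq_bEvalF, bEvalF]
  · simp [h, aGoMinus_eq_F, aGoF_eq_bEvalF, bEvalF]
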